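-- pv_equiv track=rewrite | github.com/Ruli0/INDEXER-JULES | indexer.py | pos_index
-- ===== SOURCE A (Python) =====
-- def pos_index(docs):
--    """Lists the position of a lemma in a document"""
--    result = {}
--    for i, doc in enumerate(docs):
--       for j, lemma in enumerate(doc):
--          if not lemma in result:
--             result[lemma] = {}
--          if not i in result[lemma]:
--             result[lemma][i] = []
--          result[lemma][i].append(j)
--    return result
-- ===== SOURCE B (Python) =====
-- def pos_index(docs):
--    """Lists the position of a lemma in a document"""
--    stream = [(lemma, i, j) for i, doc in enumerate(docs) for j, lemma in enumerate(doc)]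
--    return {
--       lemma: {
--          i: [j2 for l2, i2, j2 in stream if l2 == lemma and i2 == i]
--          for i in dict.fromkeys(i2 for l2, i2, _ in stream if l2 == lemma)
--       }
--       for lemma in dict.fromkeys(l for l, _, _ in stream)
--    }
-- ===== Notes on version B (the rewrite author's own statement) =====
-- stated objective: alternative
-- what changed: B flattens the corpus into a single (lemma, doc, pos) event stream and constructs the whole nested index declaratively by group-by comprehensions over that stream (ordered dedup of keys plus per-key filters), instead of A's incremental token-by-token mutation of a nested dict.
import Mathlib
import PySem

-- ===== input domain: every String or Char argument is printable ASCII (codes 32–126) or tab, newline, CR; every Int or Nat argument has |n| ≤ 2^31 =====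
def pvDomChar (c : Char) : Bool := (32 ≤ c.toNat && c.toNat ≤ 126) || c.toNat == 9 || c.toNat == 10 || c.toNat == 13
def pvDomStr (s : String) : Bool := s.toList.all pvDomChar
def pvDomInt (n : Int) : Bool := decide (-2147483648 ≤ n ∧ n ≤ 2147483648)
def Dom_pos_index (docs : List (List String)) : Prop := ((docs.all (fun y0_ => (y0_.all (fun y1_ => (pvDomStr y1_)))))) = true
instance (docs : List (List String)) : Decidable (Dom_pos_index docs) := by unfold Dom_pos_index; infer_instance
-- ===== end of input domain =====

-- B flattens the corpus into one (lemma, doc, pos) event stream and builds the nested index by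
-- group-by comprehensions over that stream, instead of A's token-by-token nested-dict mutation.

-- ===== PORT A =====
-- A's inner-loop body: ensure result[lemma] and result[lemma][i] exist, then append j.
def pvAStep (i : Int) (result : PySem.Dict String (PySem.Dict Int (List Int)))
    (q : Int × String) : PySem.Dict String (PySem.Dict Int (List Int)) :=
  let result := if result.contains q.2 then result else result.insert q.2 PySem.Dict.empty
  let inner := result.getD q.2 PySem.Dict.empty
  let inner := if inner.contains i then inner else inner.insert i []
  result.insert q.2 (inner.insert i (inner.getD i [] ++ [q.1]))

def pos_index (docs : List (List String)) : List (String × List (Int × List Int)) :=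
  let result : PySem.Dict String (PySem.Dict Int (List Int)) :=
    (PySem.List.enumerate docs).foldl
      (fun result p => (PySem.List.enumerate p.2).foldl (pvAStep p.1) result)
      PySem.Dict.empty
  result.items.map (fun r => (r.1, r.2.items))

-- ===== PORT B =====
-- stream = [(lemma, i, j) for i, doc in enumerate(docs) for j, lemma in enumerate(doc)]
def pvStream (docs : List (List String)) : List (String × Int × Int) :=
  (PySem.List.enumerate docs).flatMap
    (fun p => (PySem.List.enumerate p.2).map (fun q => (q.2, p.1, q.1)))

def pos_index_alt (docs : List (List String)) : List (String × List (Int × List Int)) :=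
  let stream := pvStream docs
  (PySem.List.dedup (stream.map (·.1))).map (fun lm =>
    (lm, (PySem.List.dedup ((stream.filter (fun t => t.1 == lm)).map (·.2.1))).map (fun i =>
      (i, (stream.filter (fun t => t.1 == lm && t.2.1 == i)).map (·.2.2)))))

-- ===== PRECONDITION & SPEC =====
def Spec_pos_index (docs : List (List String)) (out : List (String × List (Int × List Int))) : Prop := out = pos_index_alt docs
instance (docs : List (List String)) (out : List (String × List (Int × List Int))) : Decidable (Spec_pos_index docs out) := by unfold Spec_pos_index; infer_instance

-- ===== CLAIM (what is proved, stated in full; the proofs are below) =====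
def Claim_equal_pos_index : Prop := ∀ (docs : List (List String)), Dom_pos_index docs → Spec_pos_index docs (pos_index docs)

-- ===== LEMMAS AND PROOFS =====

-- the combined effect of one A token step, as a single nested modify (proof-only abbreviation)
def pvStep (r : PySem.Dict String (PySem.Dict Int (List Int)))
    (t : String × Int × Int) : PySem.Dict String (PySem.Dict Int (List Int)) :=
  r.modify t.1 PySem.Dict.empty (fun inner => inner.modify t.2.1 [] (· ++ [t.2.2]))

theorem pvAStep_eq_pvStep (i j : Int) (lm : String)
    (r : PySem.Dict String (PySem.Dict Int (List Int))) :
    pvAStep i r (j, lm) = pvStep r (lm, i, j) := by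
  unfold pvAStep pvStep PySem.Dict.modify
  by_cases hc : r.contains lm
  · simp only [hc, if_true]
    by_cases hi : (r.getD lm PySem.Dict.empty).contains i
    · simp [hi]
    · simp [hi, PySem.Dict.getD_insert_self, PySem.Dict.insert_insert_self,
        PySem.Dict.getD_of_not_contains _ _ (by simpa using hi)]
  · simp [hc, PySem.Dict.getD_insert_self, PySem.Dict.insert_insert_self,
      PySem.Dict.getD_of_not_contains _ _ (by simpa using hc)]

theorem pvA_fold_eq (docs : List (List String)) (s : Int)
    (r0 : PySem.Dict String (PySem.Dict Int (List Int))) :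
    (PySem.List.enumerate docs s).foldl
        (fun r p => (PySem.List.enumerate p.2).foldl (pvAStep p.1) r) r0
      = ((PySem.List.enumerate docs s).flatMap
          (fun p => (PySem.List.enumerate p.2).map (fun q => (q.2, p.1, q.1)))).foldl pvStep r0 := by
  induction docs generalizing s r0 with
  | nil => rfl
  | cons doc ds ih =>
    rw [PySem.List.enumerate_cons]
    simp only [List.flatMap_cons, List.foldl_cons, List.foldl_append, List.foldl_map]
    rw [ih]
    congr 1
    refine PySem.List.foldl_congr_mem _ _ _ _ (fun r q _ => ?_)
    cases q with | mk a b => exact pvAStep_eq_pvStep s a b r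

theorem pv_getD_fold (l : List (String × Int × Int))
    (r : PySem.Dict String (PySem.Dict Int (List Int))) (c : String) :
    (l.foldl pvStep r).getD c PySem.Dict.empty
      = ((l.filter (fun t => t.1 == c)).map (·.2)).foldl
          (fun inner q => inner.modify q.1 [] (· ++ [q.2]))
          (r.getD c PySem.Dict.empty) := by
  induction l generalizing r with
  | nil => rfl
  | cons t l ih =>
    simp only [List.foldl_cons, List.filter_cons]
    by_cases h : t.1 = c
    · simp only [h, beq_self_eq_true, if_true, List.map_cons, List.foldl_cons]
      rw [ih]
      unfold pvStep
      rw [h, PySem.Dict.getD_modify_self]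
    · have hb : (t.1 == c) = false := by simpa using h
      simp only [hb, Bool.false_eq_true, if_false]
      rw [ih]
      unfold pvStep
      rw [PySem.Dict.getD_modify_of_ne _ _ _ (fun he => h he.symm)]

theorem pv_fold_items (l : List (String × Int × Int)) :
    ((l.foldl pvStep PySem.Dict.empty).items.map (fun r => (r.1, r.2.items)))
      = (PySem.List.dedup (l.map (·.1))).map (fun lm =>
          (lm, (PySem.List.dedup ((l.filter (fun t => t.1 == lm)).map (·.2.1))).map (fun i =>
            (i, (l.filter (fun t => t.1 == lm && t.2.1 == i)).map (·.2.2))))) := by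
  have hkeys : (l.foldl pvStep PySem.Dict.empty).keys = PySem.Set.ofList (l.map (·.1)) := by
    show (l.foldl (fun d x => d.modify x.1 PySem.Dict.empty
        (fun inner => inner.modify x.2.1 [] (· ++ [x.2.2]))) PySem.Dict.empty).keys = _
    rw [PySem.Dict.keys_foldl_modify_key l (fun t => t.1) PySem.Dict.empty
      (fun _ t inner => inner.modify t.2.1 [] (· ++ [t.2.2])) PySem.Dict.empty]
    simp [PySem.Set.update_nil_left]
  rw [PySem.Dict.items_eq_map_keys _ (hkeys ▸ PySem.Set.nodup_ofList _) PySem.Dict.empty, hkeys]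
  rw [List.map_map]
  simp only [PySem.List.dedup_eq_ofList]
  refine List.map_congr_left (fun lm _ => ?_)
  simp only [Function.comp]
  refine Prod.ext rfl ?_
  rw [pv_getD_fold l PySem.Dict.empty lm, PySem.Dict.getD_empty]
  have hkeys2 : (((l.filter (fun t => t.1 == lm)).map (·.2)).foldl
      (fun (d : PySem.Dict Int (List Int)) (q : Int × Int) => d.modify q.1 [] (· ++ [q.2]))
        PySem.Dict.empty).keys
      = PySem.Set.ofList ((l.filter (fun t => t.1 == lm)).map (·.2.1)) := by
    rw [PySem.Dict.keys_foldl_modify_key _ (fun (q : Int × Int) => q.1) []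
      (fun _ q => (· ++ [q.2])) PySem.Dict.empty]
    simp [PySem.Set.update_nil_left, List.map_map, Function.comp_def]
  rw [PySem.Dict.items_eq_map_keys _ (hkeys2 ▸ PySem.Set.nodup_ofList _) ([] : List Int), hkeys2]
  refine List.map_congr_left (fun i _ => ?_)
  refine Prod.ext rfl ?_
  rw [PySem.Dict.getD_foldl_modify_append, PySem.Dict.getD_empty]
  simp only [List.nil_append, List.filter_map, List.map_map, Function.comp, List.filter_filter]
  refine congrArg _ (List.filter_congr (fun t _ => ?_))
  exact Bool.and_comm _ _

-- ===== VERDICT (by name: the statement is the Claim_ definition above) =====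
theorem pos_index_spec : Claim_equal_pos_index := by
  intro docs _
  unfold Spec_pos_index pos_index pos_index_alt
  rw [pvA_fold_eq docs 0 PySem.Dict.empty]
  exact pv_fold_items (pvStream docs)
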